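-- pv_equiv track=rewrite | github.com/AIOCodeBase/GFGPOTD | Problems & Solutions/W/Wine Buying and Selling/24 December 2022/Python/Wine Buying and Selling.py | wineSelling
-- ===== SOURCE A (Python) =====
-- def wineSelling(Arr, N):
--     buy=[]
--     sell=[]
--     for i in range(N):
--        if Arr[i]>0:
--            buy.append([Arr[i],i])
--        else:
--            sell.append([Arr[i],i])
--     ans=0
--     i=0
--     j=0
--     while i<len(buy) and j<len(sell):
--         x=min(buy[i][0],-sell[j][0])
--         buy[i][0]-=x
--         sell[j][0]+=x
--         diff=abs(buy[i][1]-sell[j][1])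
--         ans+=x*diff
--         if buy[i][0]==0:
--             i+=1
--         if sell[j][0]==0:
--             j+=1
--     return ans
-- ===== SOURCE B (Python) =====
-- def wineSelling(Arr, N):
--     # Single online pass: a FIFO queue of pending unmatched (amount, index) entries,
--     # all of one sign at a time; each new house is matched against the queue front.
--     pend = []    # pend[head:] is the live queue
--     head = 0
--     ans = 0
--     for i in range(N):
--         cur = Arr[i]
--         while cur != 0 and head < len(pend) and (cur > 0) != (pend[head][0] > 0):
--             amt, idx = pend[head]
--             x = min(abs(cur), abs(amt))
--             ans += x * (i - idx)
--             if cur > 0: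
--                 cur -= x
--                 amt += x
--             else:
--                 cur += x
--                 amt -= x
--             if amt == 0:
--                 head += 1
--             else:
--                 pend[head] = (amt, idx)
--         if cur != 0:
--             pend.append((cur, i))
--     return ans
-- ===== Notes on version B (the rewrite author's own statement) =====
-- stated objective: alternative
-- what changed: A partitions the array into buy/sell lists and then runs a two-pointer matching loop over them; B makes a single online pass, matching each house immediately against a FIFO queue of pending unmatched opposite-sign entries, never building the two lists.
import Mathlib
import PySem

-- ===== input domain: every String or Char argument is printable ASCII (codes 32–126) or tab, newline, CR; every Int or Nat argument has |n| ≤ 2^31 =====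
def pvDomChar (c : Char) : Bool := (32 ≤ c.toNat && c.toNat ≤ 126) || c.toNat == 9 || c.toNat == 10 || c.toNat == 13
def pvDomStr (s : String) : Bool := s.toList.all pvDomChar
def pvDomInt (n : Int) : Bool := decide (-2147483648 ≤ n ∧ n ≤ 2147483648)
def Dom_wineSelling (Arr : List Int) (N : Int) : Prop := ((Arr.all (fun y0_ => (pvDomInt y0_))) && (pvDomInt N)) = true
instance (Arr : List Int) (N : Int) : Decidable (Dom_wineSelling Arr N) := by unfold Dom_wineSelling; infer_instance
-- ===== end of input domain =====

-- B replaces A's two-phase partition-then-two-pointer matching by a single online pass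
-- with a FIFO queue of pending unmatched entries (objective: alternative, same cost).


-- ===== PORT A =====
-- A's while loop keeps indices i,j into buy/sell and mutates the head amounts in place;
-- advancing i (resp. j) past a zeroed head = dropping the consumed head, so the loop is
-- this recursion consuming the two lists from the front over the same state.
def matchA : List (Int × Int) → List (Int × Int) → Int
  | [], _ => 0
  | _ :: _, [] => 0
  | (b, bi) :: bs, (s, si) :: ss =>
    let x := min b (-s)
    let b' := b - x
    let s' := s + x
    x * |bi - si| +
      matchA (if b' = 0 then bs else (b', bi) :: bs)
             (if s' = 0 then ss else (s', si) :: ss)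
termination_by bs ss => bs.length + ss.length
decreasing_by
  all_goals
    have h : b - min b (-s) = 0 ∨ s + min b (-s) = 0 := by
      rcases min_choice b (-s) with h | h <;> omega
  all_goals split_ifs <;> simp_all <;> omega

-- the partition loop of A (Arr[i] is in range under Pre_)
def partStep (Arr : List Int) (st : List (Int × Int) × List (Int × Int)) (i : Int) :
    List (Int × Int) × List (Int × Int) :=
  let a := PySem.List.pyGetD Arr i 0
  if a > 0 then (st.1 ++ [(a, i)], st.2) else (st.1, st.2 ++ [(a, i)])

def wineSelling (Arr : List Int) (N : Int) : Int :=
  let p := (PySem.List.pyRange 0 N 1).foldl (partStep Arr) ([], [])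
  matchA p.1 p.2

-- ===== PORT B =====
-- B's inner while loop; head += 1 = dropping the front of the remaining queue pend[head:].
-- In the amt' ≠ 0 branch Python writes (amt', idx) back and the while condition then fails
-- (cur' = 0), so the port returns directly there.
def drain (i : Int) : Int → List (Int × Int) → Int → Int × List (Int × Int) × Int
  | cur, [], ans => (cur, [], ans)
  | cur, (amt, idx) :: rest, ans =>
    if cur ≠ 0 ∧ decide (cur > 0) ≠ decide (amt > 0) then
      let x := min |cur| |amt|
      let ans' := ans + x * (i - idx)
      let cur' := if cur > 0 then cur - x else cur + x
      let amt' := if cur > 0 then amt + x else amt - x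
      if amt' = 0 then drain i cur' rest ans'
      else (cur', (amt', idx) :: rest, ans')
    else (cur, (amt, idx) :: rest, ans)

def stepB (Arr : List Int) (st : List (Int × Int) × Int) (i : Int) :
    List (Int × Int) × Int :=
  let cur := PySem.List.pyGetD Arr i 0
  let d := drain i cur st.1 st.2
  (if d.1 ≠ 0 then d.2.1 ++ [(d.1, i)] else d.2.1, d.2.2)

def wineSelling_alt (Arr : List Int) (N : Int) : Int :=
  ((PySem.List.pyRange 0 N 1).foldl (stepB Arr) ([], 0)).2

-- ===== PRECONDITION & SPEC =====
-- A raises IndexError exactly when N > len(Arr); only those inputs are excluded.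
def Pre_wineSelling (Arr : List Int) (N : Int) : Prop := N ≤ Arr.length
instance (Arr : List Int) (N : Int) : Decidable (Pre_wineSelling Arr N) := by unfold Pre_wineSelling; infer_instance
def pvWitness_wineSelling : List Int × Int := ([2, -1, 0, -1], 4)

def Spec_wineSelling (Arr : List Int) (N : Int) (out : Int) : Prop := out = wineSelling_alt Arr N
instance (Arr : List Int) (N : Int) (out : Int) : Decidable (Spec_wineSelling Arr N out) := by unfold Spec_wineSelling; infer_instance

-- ===== CLAIM (what is proved, stated in full; the proofs are below) =====
def Claim_equal_wineSelling : Prop := ∀ (Arr : List Int) (N : Int), Dom_wineSelling Arr N → Pre_wineSelling Arr N → Spec_wineSelling Arr N (wineSelling Arr N)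

-- ===== LEMMAS AND PROOFS =====

-- matchA together with its residual unmatched lists (same recursion as matchA)
def matchR : List (Int × Int) → List (Int × Int) → Int × List (Int × Int) × List (Int × Int)
  | [], ss => (0, [], ss)
  | b :: bs, [] => (0, b :: bs, [])
  | (b, bi) :: bs, (s, si) :: ss =>
    let x := min b (-s)
    let b' := b - x
    let s' := s + x
    let r := matchR (if b' = 0 then bs else (b', bi) :: bs)
                    (if s' = 0 then ss else (s', si) :: ss)
    (x * |bi - si| + r.1, r.2)
termination_by bs ss => bs.length + ss.length
decreasing_by
  all_goals
    have h : b - min b (-s) = 0 ∨ s + min b (-s) = 0 := by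
      rcases min_choice b (-s) with h | h <;> omega
  all_goals split_ifs <;> simp_all <;> omega

theorem matchA_eq_matchR (bs ss : List (Int × Int)) : matchA bs ss = (matchR bs ss).1 := by
  fun_induction matchA bs ss
  next => simp [matchR]
  next => simp [matchR]
  next b bi bs s si ss ih => simp only [matchR, dite_eq_ite] at ih ⊢; rw [ih]

theorem matchR_empty (bs ss : List (Int × Int)) :
    (matchR bs ss).2.1 = [] ∨ (matchR bs ss).2.2 = [] := by
  fun_induction matchR bs ss
  next => simp
  next => simp
  next b bi bs s si ss r ih => simpa [matchR] using ih

theorem matchR_props (bs ss : List (Int × Int)) (m : Int)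
    (hb : ∀ p ∈ bs, 0 < p.1 ∧ p.2 < m) (hs : ∀ p ∈ ss, p.1 < 0 ∧ p.2 < m) :
    (∀ p ∈ (matchR bs ss).2.1, 0 < p.1 ∧ p.2 < m) ∧
    (∀ p ∈ (matchR bs ss).2.2, p.1 < 0 ∧ p.2 < m) := by
  fun_induction matchR bs ss
  next ss => exact ⟨by simp, by simpa [matchR] using hs⟩
  next b bs => exact ⟨by simpa [matchR] using hb, by simp⟩
  next b bi bs s si ss x b' s' r ih =>
    obtain ⟨hb1, hb2⟩ := hb (b, bi) (List.mem_cons_self ..)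
    obtain ⟨hs1, hs2⟩ := hs (s, si) (List.mem_cons_self ..)
    have hxb : x ≤ b := min_le_left _ _
    have hxs : x ≤ -s := min_le_right _ _
    refine ih ?_ ?_
    · intro p hp
      split at hp
      · exact hb _ (List.mem_cons_of_mem _ hp)
      · rcases List.mem_cons.mp hp with h | h
        · subst h; constructor <;> simp_all <;> omega
        · exact hb _ (List.mem_cons_of_mem _ h)
    · intro p hp
      split at hp
      · exact hs _ (List.mem_cons_of_mem _ hp)
      · rcases List.mem_cons.mp hp with h | h
        · subst h; constructor <;> simp_all <;> omega
        · exact hs _ (List.mem_cons_of_mem _ h)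

theorem matchR_append_bs (bs₁ bs₂ ss : List (Int × Int)) :
    matchR (bs₁ ++ bs₂) ss =
      ((matchR bs₁ ss).1 + (matchR ((matchR bs₁ ss).2.1 ++ bs₂) (matchR bs₁ ss).2.2).1,
       (matchR ((matchR bs₁ ss).2.1 ++ bs₂) (matchR bs₁ ss).2.2).2) := by
  fun_induction matchR bs₁ ss
  next ss => simp [matchR]
  next b bs => cases bs₂ <;> simp [matchR]
  next b bi bs s si ss x b' s' r ih =>
    show matchR ((b, bi) :: (bs ++ bs₂)) ((s, si) :: ss) = _
    simp only [matchR, dite_eq_ite] at ih ⊢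
    have hdist : (if b' = 0 then bs else (b', bi) :: bs) ++ bs₂ =
        if b' = 0 then bs ++ bs₂ else (b', bi) :: (bs ++ bs₂) := by split <;> rfl
    have hr : r = matchR (if b' = 0 then bs else (b', bi) :: bs)
        (if s' = 0 then ss else (s', si) :: ss) := rfl
    rw [hr, ← hdist, ih]
    simp [add_assoc]
    exact Or.inl rfl

theorem matchR_append_ss (bs ss₁ ss₂ : List (Int × Int)) :
    matchR bs (ss₁ ++ ss₂) =
      ((matchR bs ss₁).1 + (matchR (matchR bs ss₁).2.1 ((matchR bs ss₁).2.2 ++ ss₂)).1,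
       (matchR (matchR bs ss₁).2.1 ((matchR bs ss₁).2.2 ++ ss₂)).2) := by
  fun_induction matchR bs ss₁
  next ss => simp [matchR]
  next b bs => simp [matchR]
  next b bi bs s si ss x b' s' r ih =>
    show matchR ((b, bi) :: bs) ((s, si) :: (ss ++ ss₂)) = _
    simp only [matchR, dite_eq_ite] at ih ⊢
    have hdist : (if s' = 0 then ss else (s', si) :: ss) ++ ss₂ =
        if s' = 0 then ss ++ ss₂ else (s', si) :: (ss ++ ss₂) := by split <;> rfl
    have hr : r = matchR (if b' = 0 then bs else (b', bi) :: bs)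
        (if s' = 0 then ss else (s', si) :: ss) := rfl
    rw [hr, ← hdist, ih]
    simp [add_assoc]
    exact Or.inl rfl

theorem matchR_fst_filter (bs ss : List (Int × Int)) (hb : ∀ p ∈ bs, 0 < p.1) :
    (matchR bs (ss.filter (fun p => p.1 != 0))).1 = (matchR bs ss).1 := by
  fun_induction matchR bs ss
  next ss => simp [matchR]
  next b bs => simp [matchR]
  next b bi bs s si ss x b' s' r ih =>
    have hb0 : 0 < b := hb (b, bi) (List.mem_cons_self ..)
    have hxle : x ≤ b := min_le_left _ _
    have hxs : x ≤ -s := min_le_right _ _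
    have hex : x = min b (-s) := rfl
    have heb : b' = b - x := rfl
    have hes : s' = s + x := rfl
    have hr : r = matchR (if h : b' = 0 then bs else (b', bi) :: bs)
        (if h : s' = 0 then ss else (s', si) :: ss) := rfl
    by_cases hs0 : s = 0
    · subst hs0
      have hx : x = 0 := by simp [hex]; omega
      have hb' : ¬ b' = 0 := by omega
      have hs' : s' = 0 := by omega
      have hbb : b' = b := by omega
      simp only [dif_neg hb', dif_pos hs'] at ih hr
      rw [hbb] at ih hr
      simp only [List.filter_cons]
      norm_num
      rw [ih hb, hx, hr]
      simp
    · simp only [List.filter_cons, show (s != 0) = true by simpa using hs0, if_true]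
      simp only [matchR, dite_eq_ite]
      norm_num
      have hfil : (if s' = 0 then List.filter (fun p => p.1 != 0) ss
            else (s', si) :: List.filter (fun p => p.1 != 0) ss)
          = List.filter (fun p => p.1 != 0) (if s' = 0 then ss else (s', si) :: ss) := by
        split
        · rfl
        · next h => simp [List.filter_cons, show (s' != 0) = true by simpa using h]
      have hbarg : ∀ p ∈ (if h : b' = 0 then bs else (b', bi) :: bs), 0 < p.1 := by
        intro p hp
        split at hp
        · exact hb _ (List.mem_cons_of_mem _ hp)
        · next h =>
          rcases List.mem_cons.mp hp with h2 | h2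
          · subst h2; simp; omega
          · exact hb _ (List.mem_cons_of_mem _ h2)
      have := ih hbarg
      simp only [dite_eq_ite] at this
      rw [hfil, this]
      rfl

theorem drain_zero (i : Int) (pend : List (Int × Int)) (ans : Int) :
    drain i 0 pend ans = (0, pend, ans) := by
  cases pend with
  | nil => simp [drain]
  | cons p rest => obtain ⟨amt, idx⟩ := p; simp [drain]

theorem drain_stay (i cur : Int) (amt idx : Int) (rest : List (Int × Int)) (ans : Int)
    (h : decide (cur > 0) = decide (amt > 0)) :
    drain i cur ((amt, idx) :: rest) ans = (cur, (amt, idx) :: rest, ans) := by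
  simp [drain, h]

theorem drain_buy (i : Int) (rs : List (Int × Int)) :
    ∀ a ans : Int, 0 < a → (∀ p ∈ rs, p.1 < 0 ∧ p.2 ≤ i) →
    (drain i a rs ans).2.2 = ans + (matchR [(a, i)] rs).1 ∧
    (if (drain i a rs ans).1 ≠ 0 then (drain i a rs ans).2.1 ++ [((drain i a rs ans).1, i)]
       else (drain i a rs ans).2.1)
      = (matchR [(a, i)] rs).2.1 ++ (matchR [(a, i)] rs).2.2 := by
  induction rs with
  | nil => intro a ans ha _; simp [drain, matchR, ha.ne']
  | cons p rest ih =>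
    obtain ⟨s, si⟩ := p
    intro a ans ha hp
    obtain ⟨hs, hsi⟩ := hp (s, si) (List.mem_cons_self ..)
    have hrest := fun p hp2 => hp p (List.mem_cons_of_mem _ hp2)
    have hcond : (a ≠ 0 ∧ decide (a > 0) ≠ decide (s > 0)) := by
      constructor
      · omega
      · simp [ha, not_lt.mpr (le_of_lt hs)]
    have habs : min |a| |s| = min a (-s) := by
      rw [abs_of_pos ha, abs_of_neg hs]
    have hxor : min a (-s) = a ∨ min a (-s) = -s := min_choice a (-s)
    have hxa : min a (-s) ≤ a := min_le_left _ _
    have hxs : min a (-s) ≤ -s := min_le_right _ _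
    have habsi : |i - si| = i - si := abs_of_nonneg (by omega)
    rw [show drain i a ((s, si) :: rest) ans =
        (if (s + min a (-s)) = 0 then drain i (a - min a (-s)) rest (ans + min a (-s) * (i - si))
         else (a - min a (-s), (s + min a (-s), si) :: rest, ans + min a (-s) * (i - si))) from by
      simp [drain, hcond, habs, if_pos ha]]
    rw [show matchR [(a, i)] ((s, si) :: rest) =
        (min a (-s) * (i - si) +
          (matchR (if a - min a (-s) = 0 then [] else [(a - min a (-s), i)])
            (if s + min a (-s) = 0 then rest else (s + min a (-s), si) :: rest)).1,
         (matchR (if a - min a (-s) = 0 then [] else [(a - min a (-s), i)])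
            (if s + min a (-s) = 0 then rest else (s + min a (-s), si) :: rest)).2) from by
      simp only [matchR, dite_eq_ite, habsi]]
    by_cases hs2 : s + min a (-s) = 0
    · simp only [if_pos hs2]
      by_cases hb2 : a - min a (-s) = 0
      · simp only [if_pos hb2, hb2, drain_zero, matchR]
        exact ⟨by simp [matchR]; try ring, by simp [matchR]⟩
      · simp only [if_neg hb2]
        have hrec := ih (a - min a (-s)) (ans + min a (-s) * (i - si)) (by omega) hrest
        exact ⟨by rw [hrec.1]; ring, hrec.2⟩
    · simp only [if_neg hs2]
      have hb2 : a - min a (-s) = 0 := by rcases hxor with h | h <;> omega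
      simp only [if_pos hb2, hb2, matchR]
      exact ⟨by simp [matchR]; try ring, by simp [matchR]⟩

theorem drain_sell (i : Int) (rb : List (Int × Int)) :
    ∀ a ans : Int, a < 0 → (∀ p ∈ rb, 0 < p.1 ∧ p.2 ≤ i) →
    (drain i a rb ans).2.2 = ans + (matchR rb [(a, i)]).1 ∧
    (if (drain i a rb ans).1 ≠ 0 then (drain i a rb ans).2.1 ++ [((drain i a rb ans).1, i)]
       else (drain i a rb ans).2.1)
      = (matchR rb [(a, i)]).2.1 ++ (matchR rb [(a, i)]).2.2 := by
  induction rb with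
  | nil => intro a ans ha _; simp [drain, matchR, ha.ne]
  | cons p rest ih =>
    obtain ⟨b, bi⟩ := p
    intro a ans ha hp
    obtain ⟨hb, hbi⟩ := hp (b, bi) (List.mem_cons_self ..)
    have hrest := fun p hp2 => hp p (List.mem_cons_of_mem _ hp2)
    have hcond : (a ≠ 0 ∧ decide (a > 0) ≠ decide (b > 0)) := by
      constructor
      · omega
      · simp [hb, not_lt.mpr (le_of_lt ha)]
    have habs : min |a| |b| = min b (-a) := by
      rw [abs_of_neg ha, abs_of_pos hb, min_comm]
    have hxor : min b (-a) = b ∨ min b (-a) = -a := min_choice b (-a)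
    have hxb : min b (-a) ≤ b := min_le_left _ _
    have hxa : min b (-a) ≤ -a := min_le_right _ _
    have habsi : |bi - i| = i - bi := by rw [abs_sub_comm]; exact abs_of_nonneg (by omega)
    rw [show drain i a ((b, bi) :: rest) ans =
        (if (b - min b (-a)) = 0 then drain i (a + min b (-a)) rest (ans + min b (-a) * (i - bi))
         else (a + min b (-a), (b - min b (-a), bi) :: rest, ans + min b (-a) * (i - bi))) from by
      simp [drain, hcond, habs, if_neg (not_lt.mpr (le_of_lt ha))]]
    rw [show matchR ((b, bi) :: rest) [(a, i)] =
        (min b (-a) * (i - bi) +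
          (matchR (if b - min b (-a) = 0 then rest else (b - min b (-a), bi) :: rest)
            (if a + min b (-a) = 0 then [] else [(a + min b (-a), i)])).1,
         (matchR (if b - min b (-a) = 0 then rest else (b - min b (-a), bi) :: rest)
            (if a + min b (-a) = 0 then [] else [(a + min b (-a), i)])).2) from by
      simp only [matchR, dite_eq_ite, habsi]]
    by_cases hb2 : b - min b (-a) = 0
    · simp only [if_pos hb2]
      by_cases hs2 : a + min b (-a) = 0
      · simp only [if_pos hs2, hs2, drain_zero]
        refine ⟨by cases rest <;> simp [matchR] <;> ring, ?_⟩
        cases rest <;> simp [matchR]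
      · simp only [if_neg hs2]
        have hrec := ih (a + min b (-a)) (ans + min b (-a) * (i - bi)) (by omega) hrest
        exact ⟨by rw [hrec.1]; ring, hrec.2⟩
    · simp only [if_neg hb2]
      have hs2 : a + min b (-a) = 0 := by rcases hxor with h | h <;> omega
      simp only [if_pos hs2, hs2, matchR]
      exact ⟨by simp [matchR]; try ring, by simp [matchR]⟩

theorem matchR_nil_right (l : List (Int × Int)) : matchR l [] = (0, l, []) := by
  cases l <;> simp [matchR]

def InvWS (m : Int) (bs ss pend : List (Int × Int)) (ans : Int) : Prop :=
  (∀ p ∈ bs, 0 < p.1 ∧ p.2 < m) ∧ (∀ p ∈ ss, p.1 ≤ 0 ∧ p.2 < m) ∧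
  ans = (matchR bs (ss.filter (fun p => p.1 != 0))).1 ∧
  pend = (matchR bs (ss.filter (fun p => p.1 != 0))).2.1 ++
         (matchR bs (ss.filter (fun p => p.1 != 0))).2.2

theorem step_inv (m i a : Int) (bs ss pend : List (Int × Int)) (ans : Int)
    (hinv : InvWS m bs ss pend ans) (hmi : m ≤ i) :
    InvWS (i + 1)
      (if a > 0 then (bs ++ [(a, i)], ss) else (bs, ss ++ [(a, i)])).1
      (if a > 0 then (bs ++ [(a, i)], ss) else (bs, ss ++ [(a, i)])).2
      (if (drain i a pend ans).1 ≠ 0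
         then (drain i a pend ans).2.1 ++ [((drain i a pend ans).1, i)]
         else (drain i a pend ans).2.1)
      (drain i a pend ans).2.2 := by
  obtain ⟨hb, hs, hans, hpend⟩ := hinv
  set ssf := ss.filter (fun p => p.1 != 0) with hssf
  have hsf : ∀ p ∈ ssf, p.1 < 0 ∧ p.2 < m := by
    intro p hp
    rw [hssf, List.mem_filter] at hp
    have := hs p hp.1
    have h2 := hp.2
    simp at h2
    exact ⟨lt_of_le_of_ne this.1 h2, this.2⟩
  have hres := matchR_props bs ssf m hb hsf
  have hemp := matchR_empty bs ssf
  have hbm : ∀ p ∈ bs, 0 < p.1 ∧ p.2 < i + 1 := fun p hp => ⟨(hb p hp).1, by have := (hb p hp).2; omega⟩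
  have hsm : ∀ p ∈ ss, p.1 ≤ 0 ∧ p.2 < i + 1 := fun p hp => ⟨(hs p hp).1, by have := (hs p hp).2; omega⟩
  by_cases ha : a > 0
  · simp only [if_pos ha]
    refine ⟨?_, hsm, ?_, ?_⟩
    · intro p hp
      rcases List.mem_append.mp hp with h | h
      · exact hbm p h
      · simp at h; subst h; exact ⟨ha, by omega⟩
    all_goals rw [matchR_append_bs bs [(a, i)] ssf, ← hans]
    all_goals by_cases hrs : (matchR bs ssf).2.2 = []
    · -- ans component, rs = []
      rw [hpend, hrs, List.append_nil, matchR_nil_right]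
      cases hrb : (matchR bs ssf).2.1 with
      | nil => simp [drain]
      | cons q rest =>
        obtain ⟨amt, idx⟩ := q
        have hq : 0 < amt := by
          have := (hres.1 (amt, idx) (by rw [hrb]; exact List.mem_cons_self ..)).1
          simpa using this
        rw [drain_stay i a amt idx rest ans (by simp [ha, hq])]
        simp
    · -- ans component, rs ≠ [], so rb = []
      have hrb : (matchR bs ssf).2.1 = [] := by tauto
      rw [hpend, hrb, List.nil_append, List.nil_append]
      have hd := drain_buy i (matchR bs ssf).2.2 a ans ha
        (fun p hp => ⟨(hres.2 p hp).1, by have := (hres.2 p hp).2; omega⟩)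
      exact hd.1
    · -- pend component, rs = []
      rw [hpend, hrs, List.append_nil, matchR_nil_right]
      cases hrb : (matchR bs ssf).2.1 with
      | nil => simp [drain, ha.ne']
      | cons q rest =>
        obtain ⟨amt, idx⟩ := q
        have hq : 0 < amt := by
          have := (hres.1 (amt, idx) (by rw [hrb]; exact List.mem_cons_self ..)).1
          simpa using this
        rw [drain_stay i a amt idx rest ans (by simp [ha, hq])]
        simp [ha.ne']
    · -- pend component, rs ≠ [], rb = []
      have hrb : (matchR bs ssf).2.1 = [] := by tauto
      rw [hpend, hrb, List.nil_append, List.nil_append]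
      have hd := drain_buy i (matchR bs ssf).2.2 a ans ha
        (fun p hp => ⟨(hres.2 p hp).1, by have := (hres.2 p hp).2; omega⟩)
      exact hd.2
  · simp only [if_neg ha]
    by_cases ha0 : a = 0
    · subst ha0
      have hfil : (ss ++ [((0 : Int), i)]).filter (fun p => p.1 != 0) = ssf := by
        simp [hssf, List.filter_append]
      refine ⟨hbm, ?_, ?_, ?_⟩
      · intro p hp
        rcases List.mem_append.mp hp with h | h
        · exact hsm p h
        · simp at h; subst h; exact ⟨le_refl 0, by omega⟩
      · simpa [hfil, drain_zero, ← hssf] using hans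
      · simpa [hfil, drain_zero, ← hssf] using hpend
    · have halt : a < 0 := by omega
      have hfil : (ss ++ [(a, i)]).filter (fun p => p.1 != 0) = ssf ++ [(a, i)] := by
        simp [hssf, List.filter_append, ha0]
      refine ⟨hbm, ?_, ?_, ?_⟩
      · intro p hp
        rcases List.mem_append.mp hp with h | h
        · exact hsm p h
        · simp at h; subst h; exact ⟨le_of_lt halt, by omega⟩
      all_goals rw [hfil, matchR_append_ss bs ssf [(a, i)], ← hans]
      all_goals by_cases hrb : (matchR bs ssf).2.1 = []
      · -- ans, rb = []
        rw [hpend, hrb, List.nil_append]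
        simp only [matchR]
        cases hrs : (matchR bs ssf).2.2 with
        | nil => simp [drain]
        | cons q rest =>
          obtain ⟨amt, idx⟩ := q
          have hq : amt < 0 := by
            have := (hres.2 (amt, idx) (by rw [hrs]; exact List.mem_cons_self ..)).1
            simpa using this
          rw [drain_stay i a amt idx rest ans (by simp [not_lt.mpr (le_of_lt halt), not_lt.mpr (le_of_lt hq)])]
          simp
      · -- ans, rb ≠ [], rs = []
        have hrs : (matchR bs ssf).2.2 = [] := by tauto
        rw [hpend, hrs, List.append_nil, List.nil_append]
        have hd := drain_sell i (matchR bs ssf).2.1 a ans halt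
          (fun p hp => ⟨(hres.1 p hp).1, by have := (hres.1 p hp).2; omega⟩)
        exact hd.1
      · -- pend, rb = []
        rw [hpend, hrb, List.nil_append]
        simp only [matchR]
        cases hrs : (matchR bs ssf).2.2 with
        | nil => simp [drain, ha0]
        | cons q rest =>
          obtain ⟨amt, idx⟩ := q
          have hq : amt < 0 := by
            have := (hres.2 (amt, idx) (by rw [hrs]; exact List.mem_cons_self ..)).1
            simpa using this
          rw [drain_stay i a amt idx rest ans (by simp [not_lt.mpr (le_of_lt halt), not_lt.mpr (le_of_lt hq)])]
          simp [ha0]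
      · -- pend, rb ≠ [], rs = []
        have hrs : (matchR bs ssf).2.2 = [] := by tauto
        rw [hpend, hrs, List.append_nil, List.nil_append]
        have hd := drain_sell i (matchR bs ssf).2.1 a ans halt
          (fun p hp => ⟨(hres.1 p hp).1, by have := (hres.1 p hp).2; omega⟩)
        exact hd.2

theorem fold_inv (Arr : List Int) (L : List Int) : ∀ (m : Int) (bs ss pend : List (Int × Int)) (ans : Int),
    InvWS m bs ss pend ans → (∀ j ∈ L, m ≤ j) → L.Pairwise (· < ·) →
    matchA (L.foldl (partStep Arr) (bs, ss)).1 (L.foldl (partStep Arr) (bs, ss)).2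
      = (L.foldl (stepB Arr) (pend, ans)).2 := by
  induction L with
  | nil =>
    intro m bs ss pend ans hinv _ _
    obtain ⟨hb, _, hans, _⟩ := hinv
    simp only [List.foldl_nil]
    rw [matchA_eq_matchR, hans, ← matchR_fst_filter bs ss (fun p hp => (hb p hp).1)]
  | cons i L ih =>
    intro m bs ss pend ans hinv hle hpw
    simp only [List.foldl_cons]
    have hstep := step_inv m i (PySem.List.pyGetD Arr i 0) bs ss pend ans hinv
      (hle i (List.mem_cons_self ..))
    have hpw' := List.pairwise_cons.mp hpw
    exact ih (i + 1) (partStep Arr (bs, ss) i).1 (partStep Arr (bs, ss) i).2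
      (stepB Arr (pend, ans) i).1 (stepB Arr (pend, ans) i).2 hstep
      (fun j hj => by have := hpw'.1 j hj; omega) hpw'.2

-- ===== VERDICT (by name: the statement is the Claim_ definition above) =====
theorem wineSelling_spec : Claim_equal_wineSelling := by
  intro Arr N _ _
  unfold Spec_wineSelling wineSelling wineSelling_alt
  exact fold_inv Arr (PySem.List.pyRange 0 N 1) 0 [] [] [] 0
    ⟨by simp, by simp, by simp [matchR], by simp [matchR]⟩
    (fun j hj => (PySem.List.mem_pyRange_one.mp hj).1)
    (PySem.List.pairwise_lt_pyRange_one 0 N)
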